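-- pv_equiv track=rewrite | github.com/yonhdee/genie_sim | source/geniesim/planner/manip_solver.py | split_grasp_stages
-- ===== SOURCE A (Python) =====
-- def split_grasp_stages(stages):
--     split_stages = []
--     i = 0
--     while i < len(stages):
--         if stages[i]["action"] in ["pick", "grasp", "hook"]:
--             if (i + 1) < len(stages) and stages[i + 1]["action"] not in [
--                 "pick",
--                 "grasp",
--                 "hook",
--             ]:
--                 split_stages.append([stages[i], stages[i + 1]])
--                 i += 2
--             else:
--                 split_stages.append([stages[i]])
--                 i += 1
--         else:
--             split_stages.append([stages[i]])
--             i += 1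
--     return split_stages
-- ===== SOURCE B (Python) =====
-- GRASP_ACTIONS = ("pick", "grasp", "hook")
--
--
-- def split_grasp_stages(stages):
--     groups = []
--     for s in stages:
--         last = groups[-1] if groups else None
--         if (
--             last is not None
--             and len(last) == 1
--             and last[0]["action"] in GRASP_ACTIONS
--             and s["action"] not in GRASP_ACTIONS
--         ):
--             last.append(s)
--         else:
--             groups.append([s])
--     return groups
-- ===== Notes on version B (the rewrite author's own statement) =====
-- stated objective: simpler
-- what changed: Replaces A's index-based while-loop with stages[i+1] lookahead and an i+=2 jump by a single lookahead-free pass that appends a non-grasp stage to the previously emitted group when that group is a lone grasp stage, otherwise starts a new group.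
import Mathlib
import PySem

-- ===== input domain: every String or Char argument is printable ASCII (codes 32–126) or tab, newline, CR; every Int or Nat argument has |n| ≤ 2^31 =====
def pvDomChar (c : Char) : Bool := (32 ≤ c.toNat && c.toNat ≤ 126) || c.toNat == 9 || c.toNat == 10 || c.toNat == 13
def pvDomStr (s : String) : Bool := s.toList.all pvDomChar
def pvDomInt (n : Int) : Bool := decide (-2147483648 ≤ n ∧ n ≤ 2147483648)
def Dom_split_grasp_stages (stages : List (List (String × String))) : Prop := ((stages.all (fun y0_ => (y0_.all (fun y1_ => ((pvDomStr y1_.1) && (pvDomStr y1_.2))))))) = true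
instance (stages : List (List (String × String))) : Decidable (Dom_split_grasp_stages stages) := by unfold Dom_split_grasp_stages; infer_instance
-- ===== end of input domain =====

-- B replaces A's indexed while-loop with lookahead (i += 2 to consume a pair) by a single
-- pass that appends each stage to the previously emitted group when that group is a lone
-- grasp stage and the current stage is not; objective: simpler (no index arithmetic).


-- ===== PORT A =====
-- stage["action"]: first-match lookup in the association list (KeyError, i.e. a missing
-- key, is excluded by Pre_; the default "" is never reached inside Pre_).
def pvActA (st : List (String × String)) : String :=
  ((st.find? (fun p => p.1 == "action")).map Prod.snd).getD ""

def pvGraspA (s : String) : Bool := s ∈ (["pick", "grasp", "hook"] : List String)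

-- the while-loop of A, state = index i; stages[i] via getD (i is in range under the guard)
def pvALoop (stages : List (List (String × String))) (i : Nat) :
    List (List (List (String × String))) :=
  if h : i < stages.length then
    if pvGraspA (pvActA (stages.getD i [])) then
      if h2 : i + 1 < stages.length then
        if ¬ pvGraspA (pvActA (stages.getD (i + 1) [])) then
          [stages.getD i [], stages.getD (i + 1) []] :: pvALoop stages (i + 2)
        else
          [stages.getD i []] :: pvALoop stages (i + 1)
      else
        [stages.getD i []] :: pvALoop stages (i + 1)
    else
      [stages.getD i []] :: pvALoop stages (i + 1)
  else []
termination_by stages.length - i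

def split_grasp_stages (stages : List (List (String × String))) :
    List (List (List (String × String))) :=
  pvALoop stages 0

-- ===== PORT B =====
def pvActB (st : List (String × String)) : String :=
  ((st.find? (fun p => p.1 == "action")).map Prod.snd).getD ""

def pvGraspB (s : String) : Bool := s ∈ (["pick", "grasp", "hook"] : List String)

-- one step of B's for-loop; groups kept in reverse (head = last emitted group)
def pvBStep (acc : List (List (List (String × String)))) (s : List (String × String)) :
    List (List (List (String × String))) :=
  match acc with
  | [s0] :: rest =>
      if pvGraspB (pvActB s0) && !pvGraspB (pvActB s) then [s0, s] :: rest
      else [s] :: acc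
  | _ => [s] :: acc

def split_grasp_stages_alt (stages : List (List (String × String))) :
    List (List (List (String × String))) :=
  (stages.foldl pvBStep []).reverse

-- ===== PRECONDITION & SPEC =====
-- Pre_ excludes exactly the inputs where some stage lacks an "action" key, on which
-- Python A raises KeyError.
def Pre_split_grasp_stages (stages : List (List (String × String))) : Prop :=
  ∀ st ∈ stages, (st.find? (fun p => p.1 == "action")).isSome = true
instance (stages : List (List (String × String))) : Decidable (Pre_split_grasp_stages stages) := by
  unfold Pre_split_grasp_stages; infer_instance

def pvWitness_split_grasp_stages : (List (List (String × String))) :=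
  [[("action", "grasp")], [("action", "place")], [("action", "pick")]]

def Spec_split_grasp_stages (stages : List (List (String × String))) (out : List (List (List (String × String)))) : Prop := out = split_grasp_stages_alt stages
instance (stages : List (List (String × String))) (out : List (List (List (String × String)))) : Decidable (Spec_split_grasp_stages stages out) := by unfold Spec_split_grasp_stages; infer_instance

-- ===== CLAIM (what is proved, stated in full; the proofs are below) =====
def Claim_equal_split_grasp_stages : Prop := ∀ (stages : List (List (String × String))), Dom_split_grasp_stages stages → Pre_split_grasp_stages stages → Spec_split_grasp_stages stages (split_grasp_stages stages)

-- ===== LEMMAS AND PROOFS =====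

-- A's loop rewritten as structural recursion on the suffix of stages (bridge to port A)
def pvG : List (List (String × String)) → List (List (List (String × String)))
  | [] => []
  | [s] =>
      [[s]]
  | s :: t :: rest =>
      if pvGraspA (pvActA s) then
        if ¬ pvGraspA (pvActA t) then [s, t] :: pvG rest
        else [s] :: pvG (t :: rest)
      else [s] :: pvG (t :: rest)

lemma pvALoop_eq_pvG (stages : List (List (String × String))) (i : Nat) :
    pvALoop stages i = pvG (stages.drop i) := by
  induction i using pvALoop.induct stages with
  | case1 i h h1 h2 h3 ih =>
      have e1 : stages.getD i [] = stages[i] := List.getD_eq_getElem _ _ h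
      have e2 : stages.getD (i + 1) [] = stages[i + 1] := List.getD_eq_getElem _ _ h2
      rw [pvALoop, List.drop_eq_getElem_cons h, List.drop_eq_getElem_cons h2, pvG]
      rw [e1] at h1; rw [e2] at h3
      simp [h, h2, h1, h3, ih]
  | case2 i h h1 h2 h3 ih =>
      have e1 : stages.getD i [] = stages[i] := List.getD_eq_getElem _ _ h
      have e2 : stages.getD (i + 1) [] = stages[i + 1] := List.getD_eq_getElem _ _ h2
      rw [pvALoop, List.drop_eq_getElem_cons h, List.drop_eq_getElem_cons h2, pvG]
      rw [e1] at h1; rw [e2] at h3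
      rw [ih, List.drop_eq_getElem_cons h2]
      simp [h, h2, h1, h3]
  | case3 i h h1 h2 ih =>
      have e1 : stages.getD i [] = stages[i] := List.getD_eq_getElem _ _ h
      have hnil : stages.drop (i + 1) = [] := by
        apply List.drop_eq_nil_of_le; omega
      rw [pvALoop, List.drop_eq_getElem_cons h, hnil, pvG]
      rw [e1] at h1
      simp [h, h2, h1, ih, hnil, pvG]
  | case4 i h h1 ih =>
      have e1 : stages.getD i [] = stages[i] := List.getD_eq_getElem _ _ h
      rw [e1] at h1
      rw [pvALoop, List.drop_eq_getElem_cons h, ih]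
      rcases hdd : stages.drop (i + 1) with _ | ⟨t, rest⟩ <;>
        simp [pvG, h, h1]
  | case5 i h =>
      rw [pvALoop, dif_neg h]
      have : stages.drop i = [] := by
        apply List.drop_eq_nil_of_le; omega
      rw [this, pvG]

-- an accumulator is "blocked" when B's loop can never extend its head group
def pvBlocked : List (List (List (String × String))) → Prop
  | [s0] :: _ => pvGraspB (pvActB s0) = false
  | _ => True

lemma pvBStep_of_grasp (acc : List (List (List (String × String))))
    (s : List (String × String)) (hs : pvGraspB (pvActB s) = true) :
    pvBStep acc s = [s] :: acc := by
  unfold pvBStep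
  rcases acc with _ | ⟨g, rest⟩
  · rfl
  · rcases g with _ | ⟨s0, g'⟩
    · rfl
    · rcases g' with _ | _
      · simp [hs]
      · rfl

lemma pvBStep_of_blocked (acc : List (List (List (String × String))))
    (s : List (String × String)) (hb : pvBlocked acc) :
    pvBStep acc s = [s] :: acc := by
  unfold pvBStep
  rcases acc with _ | ⟨g, rest⟩
  · rfl
  · rcases g with _ | ⟨s0, g'⟩
    · rfl
    · rcases g' with _ | _
      · have hf : pvGraspB (pvActB s0) = false := hb
        simp [hf]
      · rfl

lemma pvFoldl_bStep_eq (stages : List (List (String × String))) :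
    ∀ acc, (pvBlocked acc ∨ (∃ s rest, stages = s :: rest ∧ pvGraspB (pvActB s) = true)) →
      List.foldl pvBStep acc stages = ((pvG stages).reverse ++ acc) := by
  induction stages using pvG.induct with
  | case1 => intro acc _; simp [pvG]
  | case2 s =>
      intro acc hok
      by_cases hs : pvGraspB (pvActB s) = true
      · simp [List.foldl, pvBStep_of_grasp acc s hs, pvG]
      · have hb : pvBlocked acc := by
          rcases hok with hb | ⟨s', rest', heq, hg⟩
          · exact hb
          · cases heq; exact absurd hg hs
        simp [List.foldl, pvBStep_of_blocked acc s hb, pvG]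
  | case3 s t rest hs ht ih =>
      -- s grasp, t not grasp: the pair is consumed
      intro acc _
      have hs' : pvGraspB (pvActB s) = true := hs
      have ht' : pvGraspB (pvActB t) = false := eq_false_of_ne_true ht
      have h1 : pvBStep acc s = [s] :: acc := pvBStep_of_grasp acc s hs'
      have h2 : pvBStep ([s] :: acc) t = [s, t] :: acc := by
        unfold pvBStep
        simp [hs', ht']
      have hb : pvBlocked ([s, t] :: acc) := trivial
      rw [List.foldl, h1, List.foldl, h2, ih _ (Or.inl hb), pvG]
      simp [hs, ht]
  | case4 s t rest hs ht ih =>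
      -- s grasp, t grasp: both become singletons
      intro acc _
      have hs' : pvGraspB (pvActB s) = true := hs
      have h1 : pvBStep acc s = [s] :: acc := pvBStep_of_grasp acc s hs'
      have hok : pvBlocked ([s] :: acc) ∨
          (∃ s' rest', t :: rest = s' :: rest' ∧ pvGraspB (pvActB s') = true) :=
        Or.inr ⟨t, rest, rfl, of_not_not ht⟩
      rw [List.foldl, h1, ih _ hok, pvG]
      simp [hs, ht]
  | case5 s t rest hs ih =>
      -- s not grasp: a new singleton group, still blocked
      intro acc hok
      have hb : pvBlocked acc := by
        rcases hok with hb | ⟨s', rest', heq, hg⟩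
        · exact hb
        · cases heq; exact absurd hg hs
      have h1 : pvBStep acc s = [s] :: acc := pvBStep_of_blocked acc s hb
      have hb1 : pvBlocked ([s] :: acc) := eq_false_of_ne_true hs
      rw [List.foldl, h1, ih _ (Or.inl hb1), pvG]
      simp [hs]

-- ===== VERDICT (by name: the statement is the Claim_ definition above) =====
theorem split_grasp_stages_spec : Claim_equal_split_grasp_stages := by
  intro stages _ _
  unfold Spec_split_grasp_stages split_grasp_stages split_grasp_stages_alt
  rw [pvALoop_eq_pvG, List.drop_zero]
  rcases stages with _ | ⟨s, rest⟩
  · simp [pvG]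
  · by_cases hs : pvGraspB (pvActB s) = true
    · rw [pvFoldl_bStep_eq _ _ (Or.inr ⟨s, rest, rfl, hs⟩)]
      simp
    · have hb : pvBlocked ([] : List (List (List (String × String)))) := trivial
      rw [pvFoldl_bStep_eq _ _ (Or.inl hb)]
      simp
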